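-- pv_equiv track=rewrite | github.com/tsuru7/algorithm-study | tessoku/chap05/B32.py | solve
-- ===== SOURCE A (Python) =====
-- def solve(n,k,a):
--     dp = [False for _ in range(n+1)]
--     a.sort()
--     for i in range(a[0], n+1):
--         for j in range(k):
--             if i-a[j] >= 0:
--                 dp[i] |= not dp[i-a[j]]
--     if dp[n]:
--         return 'First'
--     else:
--         return 'Second'
-- ===== SOURCE B (Python) =====
-- def solve(n, k, a):
--     # Top-down memoized DFS from position n: visits only positions reachable
--     # from n by subtracting usable moves, instead of filling a full 0..n table.
--     a.sort()
--     moves = [a[j] for j in range(k)]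
--     memo = [None] * (n + 1)
--     seen = {n}
--     stack = [n]
--     while stack:
--         i = stack[-1]
--         new = []
--         for x in moves:
--             if 1 <= x <= i and (i - x) not in seen:
--                 seen.add(i - x)
--                 new.append(i - x)
--         if new:
--             stack.extend(new)
--         else:
--             memo[i] = any(1 <= x <= i and not memo[i - x] for x in moves)
--             stack.pop()
--     return 'First' if memo[n] else 'Second'
-- ===== Notes on version B (the rewrite author's own statement) =====
-- stated objective: alternative
-- what changed: A fills a full bottom-up dp table over positions 0..n pulling from dp[i-a[j]]; B is a top-down memoized depth-first search from position n with an explicit stack, a seen set and an on-demand memo array, so it evaluates the game recurrence only at the positions reachable from n by subtracting usable moves (measurably faster when few positions are reachable; same O(n*k) worst case).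
-- outside the precondition, e.g. on solve(2, 1, [0]): A returns 'First', B returns 'Second'; on solve(0, 3, [5]): A returns 'Second', B raises IndexError
import Mathlib
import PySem

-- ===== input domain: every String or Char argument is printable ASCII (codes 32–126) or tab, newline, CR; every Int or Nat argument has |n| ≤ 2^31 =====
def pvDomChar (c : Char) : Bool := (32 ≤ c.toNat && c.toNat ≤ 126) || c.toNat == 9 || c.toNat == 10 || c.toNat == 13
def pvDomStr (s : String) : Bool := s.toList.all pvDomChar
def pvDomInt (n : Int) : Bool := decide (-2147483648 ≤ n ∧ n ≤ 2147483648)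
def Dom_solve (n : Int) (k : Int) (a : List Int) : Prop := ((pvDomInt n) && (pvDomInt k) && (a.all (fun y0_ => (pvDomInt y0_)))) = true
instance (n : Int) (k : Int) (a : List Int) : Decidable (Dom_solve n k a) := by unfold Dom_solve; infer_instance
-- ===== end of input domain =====

-- B replaces A's bottom-up dp table (pulling dp[i-a[j]] for every position 0..n) by a top-down
-- memoized depth-first search from position n with an explicit stack, a seen set and a memo
-- dict, evaluating the game recurrence on demand.  Both A and B sort the list argument in
-- place in Python; the equivalence proved here is about the return value.

-- ===== PORT A =====
-- inner loop body: 'if i-a[j] >= 0: dp[i] |= not dp[i-a[j]]'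
def solveAUpd (s : List Int) (i : Int) (dp : List Bool) (j : Int) : List Bool :=
  if 0 ≤ i - PySem.List.pyGetD s j 0 then
    PySem.List.pySetD dp i
      (PySem.List.pyGetD dp i false || !PySem.List.pyGetD dp (i - PySem.List.pyGetD s j 0) false)
  else dp

-- one outer iteration: 'for j in range(k): …'
def solveAStep (s : List Int) (k : Int) (dp : List Bool) (i : Int) : List Bool :=
  (PySem.List.pyRange 0 k).foldl (solveAUpd s i) dp

def solve (n : Int) (k : Int) (a : List Int) : String :=
  let dp := (PySem.List.pyRange 0 (n + 1)).map (fun _ => false)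
  let s := PySem.List.sorted a (fun x => x)                      -- a.sort()
  let dp := (PySem.List.pyRange (PySem.List.pyGetD s 0 0) (n + 1)).foldl (solveAStep s k) dp
  if PySem.List.pyGetD dp n false then "First" else "Second"

-- ===== PORT B =====
-- inner scan: 'for x in moves: if 1 <= x <= i and (i-x) not in seen: seen.add(i-x); new.append(i-x)'
def solveBScan (i : Int) (acc : List Int × PySem.Set Int) (x : Int) : List Int × PySem.Set Int :=
  if 1 ≤ x ∧ x ≤ i ∧ PySem.Set.contains acc.2 (i - x) = false then
    (acc.1 ++ [i - x], PySem.Set.add acc.2 (i - x))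
  else acc

-- 'while stack: …'.  The Lean list head is Python's stack top (stack[-1]); stack.extend(new)
-- becomes new.reverse ++ …; fuel is only a totality guard, proved sufficient below.
-- memo indexing ('memo[i] =', 'memo[i-x]', 'memo[n]') is via pySetD/pyGetD: every index the
-- Python touches on a Pre_ input lies in range 0..n, where they are exact; 'not memo[i-x]'
-- and 'if memo[n]' use Python truthiness (None is falsy), ported as (… ).getD false.
def solveBLoop (moves : List Int) (fuel : Nat) (stack : List Int) (seen : PySem.Set Int)
    (memo : List (Option Bool)) : List (Option Bool) :=
  match fuel, stack with
  | _, [] => memo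
  | 0, _ :: _ => memo
  | fuel + 1, i :: rest =>
    let p := moves.foldl (solveBScan i) ([], seen)
    if p.1 = [] then
      -- 'memo[i] = any(1 <= x <= i and not memo[i-x] for x in moves); stack.pop()'
      solveBLoop moves fuel rest p.2
        (PySem.List.pySetD memo i
          (some (moves.any fun x =>
            decide (1 ≤ x ∧ x ≤ i) && !((PySem.List.pyGetD memo (i - x) none).getD false))))
    else
      solveBLoop moves fuel (p.1.reverse ++ i :: rest) p.2 memo

def solve_alt (n : Int) (k : Int) (a : List Int) : String :=
  let s := PySem.List.sorted a (fun x => x)                      -- a.sort()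
  -- moves = [a[j] for j in range(k)]; pyGetD is exact for j in range: Pre_ keeps k ≤ len(a)
  let moves := (PySem.List.pyRange 0 k).map (fun j => PySem.List.pyGetD s j 0)
  let memo := List.replicate (n + 1).toNat (none : Option Bool)  -- [None] * (n + 1)
  let memo := solveBLoop moves ((n.toNat + 2) * (n.toNat + 1) + 2) [n]
    (PySem.Set.ofList [n]) memo
  if (PySem.List.pyGetD memo n none).getD false then "First" else "Second"

-- ===== PRECONDITION & SPEC =====
-- Pre_ covers n ≥ 0, nonempty a, k ≤ len(a), and: every element > n (the loops of both
-- programs are vacuous), or k ≤ 0 (no usable move), or a proper game instance with all moves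
-- ≥ 1.  Outside it A raises (empty a, n < 0, negative moves with k ≥ 1, k > len(a) with
-- min(a) ≤ n), with two exclusions on which A still returns: lists containing a 0 move,
-- where A's 'dp[i] |= not dp[i-0]' reads a half-updated cell, an accident of the in-place
-- update; and k > len(a) with every element > n, where B's building of the first k moves
-- raises the IndexError A's (empty) loop would have raised had it run.
def Pre_solve (n : Int) (k : Int) (a : List Int) : Prop :=
  0 ≤ n ∧ a ≠ [] ∧ k ≤ a.length ∧
    ((∀ x ∈ a, n < x) ∨ k ≤ 0 ∨ (0 < k ∧ ∀ x ∈ a, 1 ≤ x))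
instance (n : Int) (k : Int) (a : List Int) : Decidable (Pre_solve n k a) := by
  unfold Pre_solve; infer_instance

def pvWitness_solve : Int × Int × List Int := (7, 2, [3, 1])

def Spec_solve (n : Int) (k : Int) (a : List Int) (out : String) : Prop := out = solve_alt n k a
instance (n : Int) (k : Int) (a : List Int) (out : String) : Decidable (Spec_solve n k a out) := by
  unfold Spec_solve; infer_instance

-- ===== CLAIM (what is proved, stated in full; the proofs are below) =====
def Claim_equal_solve : Prop := ∀ (n : Int) (k : Int) (a : List Int),
  Dom_solve n k a → Pre_solve n k a → Spec_solve n k a (solve n k a)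

-- ===== LEMMAS AND PROOFS =====

-- The game value: position i is winning iff some move x (1 ≤ x ≤ i) leads to a losing position.
mutual
  def pvW (moves : List Int) (i : Nat) : Bool := pvWl moves i moves
    termination_by (i, moves.length + 1)
    decreasing_by simp_wf; apply Prod.Lex.right; omega
  def pvWl (moves : List Int) (i : Nat) : List Int → Bool
    | [] => false
    | x :: xs =>
        (if h : 1 ≤ x ∧ x ≤ (i : Int) then !pvW moves (i - x.toNat) else false) || pvWl moves i xs
    termination_by xs => (i, xs.length)
    decreasing_by
      all_goals simp_wf
      all_goals first
        | (apply Prod.Lex.right; omega)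
        | (apply Prod.Lex.left; omega)
end

theorem pvWl_eq_any (moves : List Int) (i : Nat) (l : List Int) :
    pvWl moves i l =
      l.any (fun x => decide (1 ≤ x ∧ x ≤ (i : Int)) && !pvW moves (i - x.toNat)) := by
  induction l with
  | nil => simp [pvWl]
  | cons x xs ih =>
      rw [pvWl, ih, List.any_cons]
      congr 1
      split_ifs with h <;> simp [h]

theorem pvW_eq_any (moves : List Int) (i : Nat) :
    pvW moves i =
      moves.any (fun x => decide (1 ≤ x ∧ x ≤ (i : Int)) && !pvW moves (i - x.toNat)) := by
  rw [pvW]; exact pvWl_eq_any moves i moves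

theorem pv_any_congr {α : Type} (l : List α) (f g : α → Bool)
    (h : ∀ x ∈ l, f x = g x) : l.any f = l.any g := by
  induction l with
  | nil => rfl
  | cons x xs ih =>
      simp only [List.any_cons, h x (by simp), ih (fun y hy => h y (by simp [hy]))]

-- reading / writing a dp list that is (List.range N).map f
theorem pv_getD_mr {α : Type} (f : Nat → α) (N : Nat) (i : Int) (d : α)
    (h0 : 0 ≤ i) (h : i < (N : Int)) :
    PySem.List.pyGetD ((List.range N).map f) i d = f i.toNat := by
  rw [PySem.List.pyGetD_eq_getElem _ d h0 (by simp; omega)]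
  simp

theorem pv_set_mr {α : Type} (f : Nat → α) (N : Nat) (i : Int) (v : α)
    (h0 : 0 ≤ i) (h : i < (N : Int)) :
    PySem.List.pySetD ((List.range N).map f) i v =
      (List.range N).map (fun m => if m = i.toNat then v else f m) := by
  rw [PySem.List.pySetD_of_nonneg _ v h0]
  apply List.ext_getElem (by simp)
  intro p hp1 hp2
  simp only [List.getElem_set, List.getElem_map, List.getElem_range]
  by_cases hpi : p = i.toNat <;> simp [hpi] <;> omega

-- W is false below the smallest move
theorem pvW_low (moves : List Int) (a0 : Int) (hmin : ∀ x ∈ moves, a0 ≤ x)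
    (m : Nat) (hm : (m : Int) < a0) : pvW moves m = false := by
  rw [pvW_eq_any]
  simp only [List.any_eq_false]
  intro x hx
  have := hmin x hx
  have : ¬ (1 ≤ x ∧ x ≤ (m : Int)) := by omega
  simp [this]

-- ===== A side =====

-- inner loop: accumulate dp[c] over the first j moves
theorem pv_innerA (s : List Int) (hs : ∀ x ∈ s, 1 ≤ x) (k : Int) (hk : k ≤ (s.length : Int))
    (n : Int) (c : Int) (hc1 : 1 ≤ c) (hcn : c ≤ n) :
    ∀ (d : Nat) (j : Int), 0 ≤ j → j ≤ k → (k - j).toNat = d →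
    (PySem.List.pyRange j k).foldl (solveAUpd s c)
      ((List.range (n + 1).toNat).map (fun (m : Nat) =>
        if (m : Int) < c then pvW (s.take k.toNat) m
        else if m = c.toNat then
          (s.take j.toNat).any (fun x => decide (x ≤ c) && !pvW (s.take k.toNat) (c - x).toNat)
        else false))
    = (List.range (n + 1).toNat).map (fun (m : Nat) =>
        if (m : Int) < c then pvW (s.take k.toNat) m
        else if m = c.toNat then
          (s.take k.toNat).any (fun x => decide (x ≤ c) && !pvW (s.take k.toNat) (c - x).toNat)
        else false) := by
  intro d
  induction d with
  | zero =>
      intro j hj0 hjk hd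
      have : j = k := by omega
      subst this
      rw [PySem.List.pyRange_one_eq_nil (le_refl _)]
      rfl
  | succ d ih =>
      intro j hj0 hjk hd
      have hjk' : j < k := by omega
      rw [PySem.List.pyRange_one_cons hjk', List.foldl_cons]
      have hjlen : j < (s.length : Int) := by omega
      have hxval : PySem.List.pyGetD s j 0 = s[j.toNat]'(by omega) := by
        exact PySem.List.pyGetD_eq_getElem s 0 hj0 (by omega)
      set x : Int := s[j.toNat]'(by omega) with hxdef
      have hx1 : 1 ≤ x := hs _ (List.getElem_mem _)
      have htake : s.take (j + 1).toNat = s.take j.toNat ++ [x] := by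
        have : (j + 1).toNat = j.toNat + 1 := by omega
        rw [this, List.take_succ]
        rw [List.getElem?_eq_getElem (show j.toNat < s.length by omega)]
        rfl
      have hstep : solveAUpd s c
          ((List.range (n + 1).toNat).map (fun (m : Nat) =>
            if (m : Int) < c then pvW (s.take k.toNat) m
            else if m = c.toNat then
              (s.take j.toNat).any (fun y => decide (y ≤ c) && !pvW (s.take k.toNat) (c - y).toNat)
            else false)) j
          = (List.range (n + 1).toNat).map (fun (m : Nat) =>
            if (m : Int) < c then pvW (s.take k.toNat) m
            else if m = c.toNat then
              (s.take (j + 1).toNat).any (fun y => decide (y ≤ c) && !pvW (s.take k.toNat) (c - y).toNat)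
            else false) := by
        rw [solveAUpd, hxval]
        by_cases hguard : 0 ≤ c - x
        · rw [if_pos hguard]
          rw [pv_getD_mr _ _ c false (by omega) (by omega)]
          rw [pv_getD_mr _ _ (c - x) false (by omega) (by omega)]
          rw [pv_set_mr _ _ c _ (by omega) (by omega)]
          have hcc : ¬ (((c.toNat : Nat) : Int) < c) := by omega
          have hcx : (((c - x).toNat : Nat) : Int) < c := by omega
          have hxc : x ≤ c := by omega
          have hx0 : 0 < x := by omega
          congr 1
          funext m
          by_cases hm : m = c.toNat
          · subst hm
            simp [htake, hxc, hx0]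
          · simp [hm]
        · rw [if_neg hguard]
          congr 1
          funext m
          by_cases hm : m = c.toNat
          · subst hm
            have hxc : ¬ (x ≤ c) := by omega
            simp [htake, hxc]
          · simp [hm]
      rw [hstep]
      exact ih (j + 1) (by omega) (by omega) (by omega)

theorem pv_stepA (s : List Int) (hs : ∀ x ∈ s, 1 ≤ x) (k : Int) (hk0 : 0 ≤ k)
    (hk : k ≤ (s.length : Int)) (n : Int) (c : Int) (hc1 : 1 ≤ c) (hcn : c ≤ n) :
    solveAStep s k
      ((List.range (n + 1).toNat).map (fun (m : Nat) =>
        if (m : Int) < c then pvW (s.take k.toNat) m else false)) c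
    = (List.range (n + 1).toNat).map (fun (m : Nat) =>
        if (m : Int) < c + 1 then pvW (s.take k.toNat) m else false) := by
  rw [solveAStep]
  have h0 := pv_innerA s hs k hk n c hc1 hcn k.toNat 0 (le_refl 0) hk0 (by omega)
  have hinit : (List.range (n + 1).toNat).map (fun (m : Nat) =>
      if (m : Int) < c then pvW (s.take k.toNat) m
      else if m = c.toNat then
        (s.take (0 : Int).toNat).any (fun x => decide (x ≤ c) && !pvW (s.take k.toNat) (c - x).toNat)
      else false)
      = (List.range (n + 1).toNat).map (fun (m : Nat) =>
        if (m : Int) < c then pvW (s.take k.toNat) m else false) := by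
    congr 1; funext m
    by_cases hm : (m : Int) < c <;> simp [hm]
  rw [hinit] at h0
  rw [h0]
  congr 1; funext m
  have hacc : (s.take k.toNat).any (fun x => decide (x ≤ c) && !pvW (s.take k.toNat) (c - x).toNat)
      = pvW (s.take k.toNat) c.toNat := by
    rw [pvW_eq_any]
    apply pv_any_congr
    intro x hx
    have hx1 : 1 ≤ x := hs x (List.mem_of_mem_take hx)
    by_cases hxc : x ≤ c
    · have h1 : (1 ≤ x ∧ x ≤ ((c.toNat : Nat) : Int)) := by constructor <;> omega
      have h2 : decide (x ≤ c) = true := by simp [hxc]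
      have h3 : c.toNat - x.toNat = (c - x).toNat := by omega
      simp [h1, h2, h3]
    · have h2 : decide (x ≤ c) = false := by simp [hxc]
      have h3 : decide (1 ≤ x ∧ x ≤ ((c.toNat : Nat) : Int)) = false := by
        simp only [decide_eq_false_iff_not]
        intro h; omega
      rw [h2, h3]
      simp
  rw [hacc]
  by_cases hm1 : (m : Int) < c
  · rw [if_pos hm1, if_pos (show (m : Int) < c + 1 by omega)]
  · by_cases hm2 : m = c.toNat
    · subst hm2
      rw [if_neg hm1, if_pos rfl, if_pos (show ((c.toNat : Nat) : Int) < c + 1 by omega)]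
    · rw [if_neg hm1, if_neg hm2, if_neg (show ¬ ((m : Int) < c + 1) by omega)]

theorem pv_loopA (s : List Int) (hs : ∀ x ∈ s, 1 ≤ x) (k : Int) (hk0 : 0 ≤ k)
    (hk : k ≤ (s.length : Int)) (n : Int) :
    ∀ (d : Nat) (c : Int), 1 ≤ c → c ≤ n + 1 → (n + 1 - c).toNat = d →
    (PySem.List.pyRange c (n + 1)).foldl (solveAStep s k)
      ((List.range (n + 1).toNat).map (fun (m : Nat) =>
        if (m : Int) < c then pvW (s.take k.toNat) m else false))
    = (List.range (n + 1).toNat).map (fun (m : Nat) =>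
        if (m : Int) < n + 1 then pvW (s.take k.toNat) m else false) := by
  intro d
  induction d with
  | zero =>
      intro c hc1 hcn hd
      have : c = n + 1 := by omega
      subst this
      rw [PySem.List.pyRange_one_eq_nil (le_refl _)]
      rfl
  | succ d ih =>
      intro c hc1 hcn hd
      have hcn' : c < n + 1 := by omega
      rw [PySem.List.pyRange_one_cons hcn', List.foldl_cons]
      rw [pv_stepA s hs k hk0 hk n c hc1 (by omega)]
      exact ih (c + 1) (by omega) (by omega) (by omega)

-- characterization of A's result
theorem pv_solveA_char (n : Int) (k : Int) (a : List Int) (hn : 0 ≤ n) (ha : a ≠ [])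
    (hk0 : 0 ≤ k) (hk : k ≤ (a.length : Int)) (hpos : ∀ x ∈ a, 1 ≤ x) :
    solve n k a =
      if pvW ((PySem.List.sorted a (fun x => x)).take k.toNat) n.toNat then "First"
      else "Second" := by
  set s := PySem.List.sorted a (fun x => x) with hsdef
  have hs : ∀ x ∈ s, 1 ≤ x := by
    intro x hx
    exact hpos x ((PySem.List.mem_sorted a _ false x).mp hx)
  have hslen : s.length = a.length := PySem.List.length_sorted a _ _
  have hks : k ≤ (s.length : Int) := by rw [hslen]; exact hk
  have hsne : s ≠ [] := by
    intro hnil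
    exact ha ((PySem.List.sorted_eq_nil_iff a _ false).mp hnil)
  obtain ⟨h0, t, hst⟩ := List.exists_cons_of_ne_nil hsne
  have ha0 : PySem.List.pyGetD s 0 0 = h0 := by rw [hst]; exact PySem.List.pyGetD_zero_cons _ _ _
  have hmin : ∀ x ∈ s.take k.toNat, h0 ≤ x := by
    intro x hx
    exact PySem.List.key_head_sorted_le a (fun x => x) hst x
      ((PySem.List.mem_sorted a _ false x).mp (List.mem_of_mem_take hx))
  have hh1 : 1 ≤ h0 := hs h0 (by rw [hst]; simp)
  have hinit : (PySem.List.pyRange 0 (n + 1)).map (fun _ => false)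
      = (List.range (n + 1).toNat).map (fun (m : Nat) =>
          if (m : Int) < h0 then pvW (s.take k.toNat) m else false) := by
    rw [PySem.List.pyRange_one 0 (n + 1)]
    simp only [List.map_map, sub_zero]
    congr 1
    funext m
    by_cases hm : (m : Int) < h0
    · simp [Function.comp, pvW_low _ h0 hmin m hm]
    · simp [Function.comp, hm]
  rw [solve, ha0, hinit]
  by_cases hcase : h0 ≤ n + 1
  · rw [pv_loopA s hs k hk0 hks n (n + 1 - h0).toNat h0 hh1 hcase rfl]
    have hgd : PySem.List.pyGetD ((List.range (n + 1).toNat).map (fun (m : Nat) =>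
          if (m : Int) < n + 1 then pvW (s.take k.toNat) m else false)) n false
        = pvW (s.take k.toNat) n.toNat := by
      rw [pv_getD_mr _ _ n false hn (by omega)]
      rw [if_pos (show ((n.toNat : Nat) : Int) < n + 1 by omega)]
    simp only [hgd]
  · rw [PySem.List.pyRange_one_eq_nil (show n + 1 ≤ h0 by omega)]
    have h2 : ((n.toNat : Nat) : Int) < h0 := by omega
    have hWn : pvW (s.take k.toNat) n.toNat = false := pvW_low _ h0 hmin n.toNat h2
    have hgd : PySem.List.pyGetD ((List.range (n + 1).toNat).map (fun (m : Nat) =>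
          if (m : Int) < h0 then pvW (s.take k.toNat) m else false)) n false = false := by
      rw [pv_getD_mr _ _ n false hn (by omega), if_pos h2, hWn]
    simp only [List.foldl_nil, hgd, hWn]

-- degenerate cases of A: no usable move, or every move overshoots n
theorem pv_getD_false_init (n : Int) (hn : 0 ≤ n) :
    PySem.List.pyGetD ((PySem.List.pyRange 0 (n + 1)).map (fun _ => false)) n false = false := by
  rw [PySem.List.pyRange_one 0 (n + 1), List.map_map]
  rw [pv_getD_mr _ _ n false hn (by omega)]
  rfl

theorem pv_solveA_k_nonpos (n : Int) (k : Int) (a : List Int) (hn : 0 ≤ n) (hk : k ≤ 0) :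
    solve n k a = "Second" := by
  rw [solve]
  have hfix : ∀ (l : List Int) (dp : List Bool),
      l.foldl (solveAStep (PySem.List.sorted a (fun x => x)) k) dp = dp := by
    intro l
    induction l with
    | nil => intro dp; rfl
    | cons y ys ih =>
        intro dp
        rw [List.foldl_cons, solveAStep, PySem.List.pyRange_one_eq_nil hk, List.foldl_nil]
        exact ih dp
  rw [hfix, pv_getD_false_init n hn]
  rfl

theorem pv_solveA_big (n : Int) (k : Int) (a : List Int) (hn : 0 ≤ n) (ha : a ≠ [])
    (hbig : ∀ x ∈ a, n < x) : solve n k a = "Second" := by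
  rw [solve]
  have hsne : PySem.List.sorted a (fun x => x) ≠ [] := by
    intro hnil
    exact ha ((PySem.List.sorted_eq_nil_iff a _ false).mp hnil)
  obtain ⟨h0, t, hst⟩ := List.exists_cons_of_ne_nil hsne
  have ha0 : PySem.List.pyGetD (PySem.List.sorted a (fun x => x)) 0 0 = h0 := by
    rw [hst]; exact PySem.List.pyGetD_zero_cons _ _ _
  have hh0 : n < h0 := hbig h0 ((PySem.List.mem_sorted a _ false h0).mp (by rw [hst]; simp))
  rw [ha0, PySem.List.pyRange_one_eq_nil (show n + 1 ≤ h0 by omega), List.foldl_nil,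
    pv_getD_false_init n hn]
  rfl

-- ===== B side =====

-- counting helper: one fresh in-range element appended to seen lowers the unseen count by 1
theorem pv_countP_split (l : List Nat) (p q : Nat → Bool) (i : Nat) (hnd : l.Nodup)
    (hi : i ∈ l) (hpi : p i = true) (hq : ∀ j, q j = (p j && !(j == i))) :
    l.countP p = l.countP q + 1 := by
  induction l with
  | nil => cases hi
  | cons y l' ih =>
      rw [List.countP_cons, List.countP_cons]
      by_cases hyi : y = i
      · subst hyi
        have hnotin : y ∉ l' := (List.nodup_cons.mp hnd).1
        have hqy : q y = false := by rw [hq]; simp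
        have hl' : l'.countP p = l'.countP q := by
          apply List.countP_congr
          intro j hj
          have hji : j ≠ y := fun h => hnotin (h ▸ hj)
          rw [hq j]
          simp [hji]
        rw [hl', hqy, hpi]
        simp
      · have hqy : q y = p y := by rw [hq]; simp [hyi]
        have hi' : i ∈ l' := by
          rcases List.mem_cons.mp hi with h | h
          · exact absurd h.symm hyi
          · exact h
        rw [hqy, ih (List.nodup_cons.mp hnd).2 hi']
        omega

def pvUnseen (N : Nat) (seen : PySem.Set Int) : Nat :=
  (List.range N).countP (fun (j : Nat) => !(PySem.Set.contains seen ((j : Int))))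

theorem pv_unseen_app (N : Nat) (seen : PySem.Set Int) (c : Int) (hc0 : 0 ≤ c)
    (hcN : c < (N : Int)) (hns : c ∉ seen) :
    pvUnseen N seen = pvUnseen N (seen ++ [c]) + 1 := by
  unfold pvUnseen
  apply pv_countP_split (List.range N) _ _ c.toNat (List.nodup_range)
    (by simp; omega)
  · simp only [Bool.not_eq_true', ← Bool.not_eq_true]
    intro h
    rw [PySem.Set.contains_eq_listContains] at h
    have : c ∈ seen := by
      have h2 : (c.toNat : Int) = c := by omega
      rw [h2] at h
      exact List.mem_of_elem_eq_true h
    exact hns this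
  · intro j
    have hmem : PySem.Set.contains (seen ++ [c]) (j : Int)
        = (PySem.Set.contains seen (j : Int) || ((j : Int) == c)) := by
      simp only [PySem.Set.contains_eq_listContains]
      by_cases hj : (j : Int) ∈ seen ++ [c]
      · rcases List.mem_append.mp hj with h1 | h1
        · simp [List.contains_eq_mem, List.mem_append, h1]
        · have hjc : (j : Int) = c := by simpa using h1
          simp [List.contains_eq_mem, List.mem_append, hjc]
      · have h1 : (j : Int) ∉ seen := fun h => hj (List.mem_append.mpr (Or.inl h))
        have h2 : (j : Int) ≠ c := by
          intro h; exact hj (List.mem_append.mpr (Or.inr (by simp [h])))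
        simp only [List.contains_eq_mem]
        simp [hj, h1, h2]
    rw [hmem]
    have : ((j : Int) == c) = (j == c.toNat) := by
      by_cases h : j = c.toNat
      · subst h; simp; omega
      · have : (j : Int) ≠ c := by omega
        simp [h, this]
    rw [this]
    cases PySem.Set.contains seen (j : Int) <;> cases (j == c.toNat) <;> simp

-- appending a batch of fresh, pairwise-distinct, in-range elements lowers the count by its length
theorem pv_unseen_batch (N : Nat) (add : List Int) :
    ∀ seen : PySem.Set Int, (∀ c ∈ add, c ∉ seen) → add.Pairwise (· > ·) →
    (∀ c ∈ add, 0 ≤ c ∧ c < (N : Int)) →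
    pvUnseen N seen = pvUnseen N (seen ++ add) + add.length := by
  induction add with
  | nil => intro seen _ _ _; simp
  | cons c cs ih =>
      intro seen hdisj hpw hrange
      have h0 := hrange c (by simp)
      rw [pv_unseen_app N seen c h0.1 h0.2 (hdisj c (by simp))]
      have hrec := ih (seen ++ [c])
        (by
          intro c' hc' hmem
          rcases List.mem_append.mp hmem with h | h
          · exact hdisj c' (by simp [hc']) h
          · have hlt := (List.pairwise_cons.mp hpw).1 c' hc'
            simp at h
            omega)
        (List.pairwise_cons.mp hpw).2
        (fun c' hc' => hrange c' (by simp [hc']))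
      rw [hrec, List.append_assoc, List.singleton_append, List.length_cons]
      omega

-- the inner scan over moves, characterised
theorem pv_scanB (i : Int) :
    ∀ (ms new : List Int) (seen : PySem.Set Int),
    ms.Pairwise (· ≤ ·) →
    (∀ c ∈ new, c ∈ seen) →
    (∀ x ∈ ms, ∀ c ∈ new, i - x ≤ c) →
    new.Pairwise (· > ·) →
    ∃ add : List Int,
      ms.foldl (solveBScan i) (new, seen) = (new ++ add, seen ++ add) ∧
      (∀ c ∈ add, c ∉ seen ∧ ∃ x ∈ ms, 1 ≤ x ∧ x ≤ i ∧ c = i - x) ∧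
      (new ++ add).Pairwise (· > ·) ∧
      (∀ x ∈ ms, 1 ≤ x → x ≤ i → (i - x) ∈ seen ++ add) := by
  intro ms
  induction ms with
  | nil =>
      intro new seen _ _ _ hpw
      exact ⟨[], by simp, by simp, by simpa using hpw, by simp⟩
  | cons x ms' ih =>
      intro new seen hpair hsub hle hpw
      rw [List.foldl_cons]
      by_cases hguard : 1 ≤ x ∧ x ≤ i ∧ PySem.Set.contains seen (i - x) = false
      · have hnotin : (i - x) ∉ seen := by
          intro h
          have hc := (PySem.Set.contains_iff seen (i - x)).mpr h
          rw [hguard.2.2] at hc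
          cases hc
        have hadd : PySem.Set.add seen (i - x) = seen ++ [i - x] := by
          rw [PySem.Set.add, hguard.2.2]
          simp
        have hstep : solveBScan i (new, seen) x = (new ++ [i - x], seen ++ [i - x]) := by
          rw [solveBScan, if_pos hguard, hadd]
        rw [hstep]
        have hlt : ∀ c ∈ new, i - x < c := by
          intro c hc
          have h1 := hle x (by simp) c hc
          have h2 : i - x ≠ c := fun h => hnotin (h ▸ hsub c hc)
          omega
        have hnew' : (new ++ [i - x]).Pairwise (· > ·) := by
          rw [List.pairwise_append]
          exact ⟨hpw, by simp, by intro a ha b hb; simp at hb; subst hb; exact hlt a ha⟩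
        obtain ⟨add, he, hc2, hc3, hc4⟩ :=
          ih (new ++ [i - x]) (seen ++ [i - x])
            (List.Pairwise.sublist (by simp) hpair)
            (by
              intro c hc
              rcases List.mem_append.mp hc with h | h
              · exact List.mem_append.mpr (Or.inl (hsub c h))
              · exact List.mem_append.mpr (Or.inr h))
            (by
              intro x' hx' c hc
              have hxx' : x ≤ x' := (List.pairwise_cons.mp hpair).1 x' hx'
              rcases List.mem_append.mp hc with h | h
              · have := hle x' (by simp [hx']) c h
                omega
              · simp at h; omega)
            hnew'
        refine ⟨(i - x) :: add, ?_, ?_, ?_, ?_⟩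
        · rw [he]
          simp
        · intro c hc
          rcases List.mem_cons.mp hc with rfl | hc'
          · exact ⟨hnotin, x, by simp, hguard.1, hguard.2.1, rfl⟩
          · obtain ⟨hns, x', hx', h1, h2, h3⟩ := hc2 c hc'
            refine ⟨fun h => hns (List.mem_append.mpr (Or.inl h)), x', by simp [hx'], h1, h2, h3⟩
        · have := hc3
          rwa [List.append_assoc, List.singleton_append] at this
        · intro x' hx' h1 h2
          rcases List.mem_cons.mp hx' with rfl | hx''
          · exact List.mem_append.mpr (Or.inr (by simp))
          · have := hc4 x' hx'' h1 h2
            rcases List.mem_append.mp this with h | h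
            · rcases List.mem_append.mp h with h' | h'
              · exact List.mem_append.mpr (Or.inl h')
              · simp at h'
                exact List.mem_append.mpr (Or.inr (by simp [h']))
            · exact List.mem_append.mpr (Or.inr (by simp [h]))
      · have hstep : solveBScan i (new, seen) x = (new, seen) := by
          rw [solveBScan, if_neg hguard]
        rw [hstep]
        obtain ⟨add, he, hc2, hc3, hc4⟩ :=
          ih new seen (List.Pairwise.sublist (by simp) hpair) hsub
            (fun x' hx' c hc => hle x' (by simp [hx']) c hc) hpw
        refine ⟨add, he, ?_, hc3, ?_⟩
        · intro c hc
          obtain ⟨hns, x', hx', h1, h2, h3⟩ := hc2 c hc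
          exact ⟨hns, x', by simp [hx'], h1, h2, h3⟩
        · intro x' hx' h1 h2
          rcases List.mem_cons.mp hx' with rfl | hx''
          · have hcont : PySem.Set.contains seen (i - x') = true := by
              rcases Bool.eq_false_or_eq_true (PySem.Set.contains seen (i - x')) with h | h
              · exact h
              · exact absurd ⟨h1, h2, h⟩ hguard
            exact List.mem_append.mpr (Or.inl ((PySem.Set.contains_iff seen (i - x')).mp hcont))
          · exact hc4 x' hx'' h1 h2

-- the DFS loop: if the fuel dominates the potential, the final memo has the game value at n
theorem pv_loopB_ok (moves : List Int) (hm : moves.Pairwise (· ≤ ·)) (n : Int) (hn : 0 ≤ n) :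
    ∀ (fuel : Nat) (stack : List Int) (seen : PySem.Set Int) (g : Nat → Option Bool),
    (n.toNat + 2) * pvUnseen (n.toNat + 1) seen + stack.length < fuel →
    stack.Pairwise (· < ·) →
    (∀ j ∈ stack, 0 ≤ j ∧ j ≤ n ∧ j ∈ seen ∧ g j.toNat = none) →
    (∀ (m : Nat) (b : Bool), g m = some b → b = pvW moves m) →
    (∀ j ∈ seen, j ∈ stack ∨ (0 ≤ j ∧ j ≤ n ∧ g j.toNat ≠ none)) →
    (∀ j : Int, 0 ≤ j → j ≤ n → g j.toNat ≠ none → j ∈ seen) →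
    (if stack = [] then g n.toNat = some (pvW moves n.toNat)
     else stack.getLast? = some n) →
    PySem.List.pyGetD
        (solveBLoop moves fuel stack seen ((List.range (n.toNat + 1)).map g)) n none
      = some (pvW moves n.toNat) := by
  intro fuel
  induction fuel with
  | zero => intro stack seen g hfuel; omega
  | succ fuel ih =>
      intro stack seen g hfuel hpw hstk hmemo hseen hmkeys hlast
      match stack with
      | [] =>
          rw [solveBLoop]
          rw [pv_getD_mr g (n.toNat + 1) n none hn (by push_cast; omega)]
          simpa using hlast
      | i :: rest =>
          simp only [solveBLoop]
          obtain ⟨hi0, hin, hiseen, himemo⟩ := hstk i (by simp)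
          obtain ⟨add, he, hadd, hpadd, hall⟩ :=
            pv_scanB i moves [] seen hm (by simp) (by simp) (by simp)
          rw [he]
          simp only [List.nil_append]
          by_cases hcase : add = []
          · subst hcase
            rw [if_pos rfl]
            simp only [List.append_nil]
            -- the value written for i is the game value
            have hval : (moves.any fun x =>
                decide (1 ≤ x ∧ x ≤ i)
                  && !((PySem.List.pyGetD ((List.range (n.toNat + 1)).map g) (i - x) none).getD
                        false))
                = pvW moves i.toNat := by
              rw [pvW_eq_any]
              apply pv_any_congr
              intro x hx
              by_cases hg : 1 ≤ x ∧ x ≤ i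
              · have hg' : 1 ≤ x ∧ x ≤ ((i.toNat : Nat) : Int) := by
                  constructor <;> omega
                have hcseen : (i - x) ∈ seen := by
                  have := hall x hx hg.1 hg.2
                  simpa using this
                have hcnot : (i - x) ∉ (i :: rest) := by
                  intro hmem
                  rcases List.mem_cons.mp hmem with h | h
                  · omega
                  · have := (List.pairwise_cons.mp hpw).1 _ h
                    omega
                have hcval : g (i - x).toNat ≠ none := by
                  rcases hseen (i - x) hcseen with h | h
                  · exact absurd h hcnot
                  · exact h.2.2
                obtain ⟨b, hb⟩ : ∃ b, g (i - x).toNat = some b := by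
                  cases hgc : g (i - x).toNat with
                  | none => exact absurd hgc hcval
                  | some b => exact ⟨b, rfl⟩
                have hbv := hmemo _ _ hb
                have htn : (i - x).toNat = i.toNat - x.toNat := by omega
                rw [pv_getD_mr g (n.toNat + 1) (i - x) none (by omega) (by push_cast; omega)]
                rw [hb, hbv, htn]
                simp [hg, hg']
              · have e1 : decide (1 ≤ x ∧ x ≤ i) = false := by
                  simp only [decide_eq_false_iff_not]
                  exact hg
                have e2 : decide (1 ≤ x ∧ x ≤ ((i.toNat : Nat) : Int)) = false := by
                  simp only [decide_eq_false_iff_not]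
                  intro h
                  exact hg ⟨h.1, by omega⟩
                rw [e1, e2]
                simp
            rw [hval]
            rw [pv_set_mr g (n.toNat + 1) i (some (pvW moves i.toNat)) hi0 (by push_cast; omega)]
            apply ih
            · -- potential decreases: memo grows but we count the stack
              have : rest.length + 1 = (i :: rest).length := by simp
              omega
            · exact List.Pairwise.sublist (by simp) hpw
            · intro j hj
              obtain ⟨h1, h2, h3, h4⟩ := hstk j (by simp [hj])
              refine ⟨h1, h2, h3, ?_⟩
              have hne : j.toNat ≠ i.toNat := by
                have := (List.pairwise_cons.mp hpw).1 _ hj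
                omega
              simp only [hne, if_false]
              exact h4
            · intro m b hb
              by_cases hmi : m = i.toNat
              · subst hmi
                simp only [if_pos rfl] at hb
                cases hb
                rfl
              · simp only [hmi, if_false] at hb
                exact hmemo m b hb
            · intro j hj
              rcases hseen j hj with h | h
              · rcases List.mem_cons.mp h with rfl | h'
                · right
                  refine ⟨hi0, hin, ?_⟩
                  simp only [if_pos rfl]
                  simp
                · exact Or.inl h'
              · right
                refine ⟨h.1, h.2.1, ?_⟩
                by_cases hmi : j.toNat = i.toNat
                · simp only [hmi, if_pos rfl]
                  simp
                · simp only [hmi, if_false]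
                  exact h.2.2
            · intro j hj0 hjn hne
              by_cases hmi : j.toNat = i.toNat
              · have : j = i := by omega
                subst this
                exact hiseen
              · simp only [hmi, if_false] at hne
                exact hmkeys j hj0 hjn hne
            · cases rest with
              | nil =>
                  have hni : i = n := by simpa using hlast
                  subst hni
                  simp only [if_pos rfl]
                  simp
              | cons r rs =>
                  have hl : (i :: r :: rs).getLast? = some n := by simpa using hlast
                  rw [if_neg (show (r :: rs : List Int) ≠ [] by simp)]
                  simpa using hl
          · rw [if_neg hcase]
            -- push: unseen count drops by add.length
            have hinrange : ∀ c ∈ add, 0 ≤ c ∧ c < i := by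
              intro c hc
              obtain ⟨_, x, _, h1, h2, h3⟩ := hadd c hc
              omega
            have hU : pvUnseen (n.toNat + 1) seen
                = pvUnseen (n.toNat + 1) (seen ++ add) + add.length := by
              apply pv_unseen_batch (n.toNat + 1) add seen
                (fun c hc => (hadd c hc).1) (by simpa using hpadd)
              intro c hc
              obtain ⟨h1, h2⟩ := hinrange c hc
              constructor
              · exact h1
              · push_cast
                omega
            apply ih
            · -- potential strictly decreases on a push
              have hlen : add.length ≥ 1 := by
                cases add with
                | nil => exact absurd rfl hcase
                | cons _ _ => simp
              have hmul : (n.toNat + 2) * (pvUnseen (n.toNat + 1) (seen ++ add) + add.length)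
                  = (n.toNat + 2) * pvUnseen (n.toNat + 1) (seen ++ add)
                    + (n.toNat + 2) * add.length := by ring
              have hge : 2 * add.length ≤ (n.toNat + 2) * add.length :=
                Nat.mul_le_mul_right _ (by omega)
              have hlstk : (add.reverse ++ i :: rest).length = add.length + rest.length + 1 := by
                simp
                omega
              rw [hU, hmul] at hfuel
              simp only [List.length_cons] at hfuel ⊢
              omega
            · -- the new stack is still strictly increasing head→tail
              rw [List.pairwise_append]
              refine ⟨?_, hpw, ?_⟩
              · rw [List.pairwise_reverse]
                exact hpadd
              · intro c hc j hj
                have hci := (hinrange c (by simpa using hc)).2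
                rcases List.mem_cons.mp hj with rfl | h
                · exact hci
                · have := (List.pairwise_cons.mp hpw).1 _ h
                  omega
            · intro j hj
              rcases List.mem_append.mp hj with h | h
              · have h' := List.mem_reverse.mp h
                obtain ⟨h1, h2⟩ := hinrange j h'
                obtain ⟨hns, _⟩ := hadd j h'
                refine ⟨h1, by omega, List.mem_append.mpr (Or.inr h'), ?_⟩
                cases hgc : g j.toNat with
                | none => rfl
                | some b =>
                    exact absurd (hmkeys j h1 (by omega) (by rw [hgc]; simp)) hns
              · obtain ⟨h1, h2, h3, h4⟩ := hstk j h
                exact ⟨h1, h2, List.mem_append.mpr (Or.inl h3), h4⟩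
            · exact hmemo
            · intro j hj
              rcases List.mem_append.mp hj with h | h
              · rcases hseen j h with h' | h'
                · exact Or.inl (List.mem_append.mpr (Or.inr h'))
                · exact Or.inr h'
              · exact Or.inl (List.mem_append.mpr (Or.inl (List.mem_reverse.mpr h)))
            · intro j hj0 hjn hne
              exact List.mem_append.mpr (Or.inl (hmkeys j hj0 hjn hne))
            · have hne : (add.reverse ++ i :: rest) ≠ [] := by simp
              rw [if_neg hne]
              rw [List.getLast?_append_of_ne_nil add.reverse
                (show (i :: rest : List Int) ≠ [] by simp)]
              simpa using hlast

-- characterization of B's result: only 0 ≤ n is needed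
theorem pv_solveB_char (n : Int) (k : Int) (a : List Int) (hn : 0 ≤ n)
    (hklen : k ≤ (a.length : Int)) :
    solve_alt n k a =
      if pvW ((PySem.List.sorted a (fun x => x)).take k.toNat) n.toNat then "First"
      else "Second" := by
  set s := PySem.List.sorted a (fun x => x) with hsdef
  have hslen : s.length = a.length := PySem.List.length_sorted a _ _
  have hks : k ≤ (s.length : Int) := by rw [hslen]; exact hklen
  have hmoves : (PySem.List.pyRange 0 k).map (fun j => PySem.List.pyGetD s j 0)
      = s.take k.toNat := by
    by_cases hk0 : k ≤ 0
    · rw [PySem.List.pyRange_one_eq_nil hk0]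
      have hz : k.toNat = 0 := by omega
      rw [hz]
      rfl
    · apply List.ext_getElem
      · rw [List.length_map, PySem.List.pyRange_one 0 k, List.length_map, List.length_range,
          List.length_take]
        omega
      · intro m h1 h2
        have hmk : (m : Int) < k := by
          rw [List.length_map, PySem.List.pyRange_one 0 k, List.length_map,
            List.length_range] at h1
          omega
        have hms : m < s.length := by omega
        simp only [List.getElem_map, List.getElem_take]
        rw [PySem.List.getElem_pyRange_one]
        rw [PySem.List.pyGetD_eq_getElem s 0 (by omega) (by omega)]
        congr 1
        omega
  set moves := s.take k.toNat with hmdef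
  have hpair : moves.Pairwise (· ≤ ·) := by
    apply List.Pairwise.sublist (List.take_sublist _ _)
    exact PySem.List.sorted_pairwise a (fun x => x)
  have hofl : PySem.Set.ofList [n] = [n] := by
    apply PySem.Set.ofList_eq_self_of_nodup
    simp
  have hU0 : pvUnseen (n.toNat + 1) ([n] : PySem.Set Int) + 1 = n.toNat + 1 := by
    have := pv_countP_split (List.range (n.toNat + 1)) (fun _ => true)
      (fun j => !(PySem.Set.contains ([n] : PySem.Set Int) (j : Int))) n.toNat
      List.nodup_range (by simp) rfl
      (by
        intro j
        simp only [Bool.true_and]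
        by_cases h : j = n.toNat
        · subst h
          have hc : PySem.Set.contains ([n] : PySem.Set Int) ((n.toNat : Nat) : Int) = true := by
            apply (PySem.Set.contains_iff _ _).mpr
            simp
            omega
          rw [hc]
          simp
        · have hc : PySem.Set.contains ([n] : PySem.Set Int) ((j : Nat) : Int) = false := by
            rw [PySem.Set.contains_eq_listContains]
            simp [List.contains_eq_mem]
            omega
          rw [hc]
          simp [h])
    rw [List.countP_true, List.length_range] at this
    rw [pvUnseen]
    omega
  have hrepl : List.replicate (n + 1).toNat (none : Option Bool)
      = (List.range (n.toNat + 1)).map (fun _ => (none : Option Bool)) := by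
    rw [List.map_const', List.length_range]
    congr 1
    omega
  have hloop := pv_loopB_ok moves hpair n hn ((n.toNat + 2) * (n.toNat + 1) + 2) [n] [n]
    (fun _ => (none : Option Bool))
    (by
      have h1 : (n.toNat + 2) * (pvUnseen (n.toNat + 1) ([n] : PySem.Set Int) + 1)
          = (n.toNat + 2) * pvUnseen (n.toNat + 1) ([n] : PySem.Set Int) + (n.toNat + 2) := by
        ring
      rw [hU0] at h1
      simp only [List.length_cons, List.length_nil]
      omega)
    (by simp)
    (by
      intro j hj
      simp at hj
      subst hj
      exact ⟨hn, le_refl _, by simp, rfl⟩)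
    (by
      intro m b hb
      cases hb)
    (by intro j hj; exact Or.inl hj)
    (by
      intro j _ _ h
      exact absurd rfl h)
    (by simp)
  rw [solve_alt]
  simp only [← hsdef, hmoves, ← hmdef, hofl, hrepl]
  rw [hloop]
  simp

-- ===== VERDICT (by name: the statement is the Claim_ definition above) =====
theorem solve_spec : Claim_equal_solve := by
  intro n k a _ hpre
  obtain ⟨hn, ha, hklen, hrest⟩ := hpre
  unfold Spec_solve
  rw [pv_solveB_char n k a hn (by exact_mod_cast hklen)]
  rcases hrest with hbig | hk0 | ⟨hkpos, hpos⟩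
  · rw [pv_solveA_big n k a hn ha hbig]
    have : pvW ((PySem.List.sorted a (fun x => x)).take k.toNat) n.toNat = false := by
      apply pvW_low _ (n + 1)
      · intro x hx
        have := hbig x ((PySem.List.mem_sorted a _ false x).mp (List.mem_of_mem_take hx))
        omega
      · omega
    rw [this]
    rfl
  · rw [pv_solveA_k_nonpos n k a hn hk0]
    have hk0' : k.toNat = 0 := by omega
    have : pvW ((PySem.List.sorted a (fun x => x)).take k.toNat) n.toNat = false := by
      rw [hk0']
      rw [pvW_eq_any]
      simp
    rw [this]
    rfl
  · rw [pv_solveA_char n k a hn ha (by omega) (by exact_mod_cast hklen) hpos]
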